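-- pv_equiv track=rewrite | github.com/sa-saqib/montgomery | rightshift.py | rs
-- ===== SOURCE A (Python) =====
-- def rs(a):
--     b= [(int(x,16)) for x in a]
--     re=[]
--     for i in range(len(a)-1):
--         # if b[i+1]&1 ==1:
--         #     z=((b[i]>>1) | 1<<7)
--         # else:
--         #     z=(b[i]>>1)
--         z=((b[i]>>1) | (1<<7)) if b[i+1]&1 ==1 else (b[i]>>1)
--
--         re.append(format((z),"02x"))
--     zl=(b[-1])>>1
--     re.append(format((zl),"02x"))
--
--     return re
-- ===== SOURCE B (Python) =====
-- def rs(a):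
--     b = [int(x, 16) for x in a]
--     out = [format(b[-1] >> 1, "02x")]
--     carry = b[-1] & 1
--     for i in range(len(b) - 2, -1, -1):
--         out.append(format((b[i] >> 1) | (carry << 7), "02x"))
--         carry = b[i] & 1
--     return list(reversed(out))
-- ===== Notes on version B (the rewrite author's own statement) =====
-- stated objective: alternative
-- what changed: B walks the byte list right-to-left once, threading a running carry bit (low bit of the element just processed) and reversing the accumulated output, instead of A's forward loop that looks ahead at b[i+1]&1 for every index.
import Mathlib
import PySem

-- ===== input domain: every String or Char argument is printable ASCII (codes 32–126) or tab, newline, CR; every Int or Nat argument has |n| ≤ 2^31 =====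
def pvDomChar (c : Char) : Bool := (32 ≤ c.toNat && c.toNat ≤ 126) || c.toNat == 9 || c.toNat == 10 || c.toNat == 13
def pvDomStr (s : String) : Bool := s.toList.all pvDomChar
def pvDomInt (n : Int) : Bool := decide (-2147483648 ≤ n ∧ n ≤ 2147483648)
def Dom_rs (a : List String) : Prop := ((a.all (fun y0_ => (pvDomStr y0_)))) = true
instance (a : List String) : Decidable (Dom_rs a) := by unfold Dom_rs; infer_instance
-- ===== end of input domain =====

-- B right-shifts the byte list right-to-left with a running carry bit instead of A's per-index
-- look-ahead at b[i+1]; same cost, different decomposition ("alternative"). Return value only.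

-- exact port of format(n, "02x"): lowercase hex digits of |n|, '-' in front for n < 0,
-- zero-padded to width 2 with the sign staying in front (Python's zfill rule); shared by both ports
def pvFmt02x (n : Int) : String :=
  PySem.Str.zfill (String.ofList ((if n < 0 then ['-'] else []) ++ Nat.toDigits 16 n.natAbs)) 2

-- ===== PORT A =====
def rs (a : List String) : List String :=
  let b := a.map (fun x => (PySem.Int.ofStrBase? x 16).getD 0)
  let re := (PySem.List.pyRange 0 ((a.length : Int) - 1) 1).foldl
      (fun re i =>
        let z := if PySem.Int.band (PySem.List.pyGetD b (i + 1) 0) 1 == 1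
          then PySem.Int.bor ((PySem.List.pyGetD b i 0) >>> (1 : Nat)) ((1 : Int) <<< (7 : Nat))
          else (PySem.List.pyGetD b i 0) >>> (1 : Nat)
        re ++ [pvFmt02x z]) []
  let zl := ((PySem.List.pyGet? b (-1)).getD 0) >>> (1 : Nat)
  re ++ [pvFmt02x zl]

-- ===== PORT B =====
def rs_alt (a : List String) : List String :=
  let b := a.map (fun x => (PySem.Int.ofStrBase? x 16).getD 0)
  let last := (PySem.List.pyGet? b (-1)).getD 0
  let s := (PySem.List.pyRange ((b.length : Int) - 2) (-1) (-1)).foldl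
      (fun (s : List String × Int) i =>
        (s.1 ++ [pvFmt02x (PySem.Int.bor ((PySem.List.pyGetD b i 0) >>> (1 : Nat)) (s.2 <<< (7 : Nat)))],
         PySem.Int.band (PySem.List.pyGetD b i 0) 1))
      ([pvFmt02x (last >>> (1 : Nat))], PySem.Int.band last 1)
  s.1.reverse

-- ===== PRECONDITION & SPEC =====
-- Pre_ excludes exactly the inputs where A raises: the empty list (IndexError at b[-1])
-- and lists with a string int(x, 16) rejects (ValueError); B raises there too.
def Pre_rs (a : List String) : Prop :=
  a ≠ [] ∧ (a.all (fun s => (PySem.Int.ofStrBase? s 16).isSome)) = true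
instance (a : List String) : Decidable (Pre_rs a) := by unfold Pre_rs; infer_instance

def pvWitness_rs : List String := ["0a", "03"]

def Spec_rs (a : List String) (out : List String) : Prop := out = rs_alt a
instance (a : List String) (out : List String) : Decidable (Spec_rs a out) := by unfold Spec_rs; infer_instance

-- ===== CLAIM (what is proved, stated in full; the proofs are below) =====
def Claim_equal_rs : Prop := ∀ (a : List String), Dom_rs a → Pre_rs a → Spec_rs a (rs a)

-- ===== LEMMAS AND PROOFS =====

def pvParse (a : List String) : List Int := a.map (fun x => (PySem.Int.ofStrBase? x 16).getD 0)

def pvZ (x y : Int) : Int :=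
  if PySem.Int.band y 1 == 1
  then PySem.Int.bor (x >>> (1 : Nat)) ((1 : Int) <<< (7 : Nat))
  else x >>> (1 : Nat)

def pvG : List Int → List String
  | [] => []
  | [x] => [pvFmt02x (x >>> (1 : Nat))]
  | x :: y :: t => pvFmt02x (pvZ x y) :: pvG (y :: t)

def pvF (b : List Int) (s : List String × Int) (i : Int) : List String × Int :=
  (s.1 ++ [pvFmt02x (PySem.Int.bor ((PySem.List.pyGetD b i 0) >>> (1 : Nat)) (s.2 <<< (7 : Nat)))],
   PySem.Int.band (PySem.List.pyGetD b i 0) 1)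

lemma pvGetD_cons_succ {x : Int} (xs : List Int) {i : Int} (hi : 0 ≤ i) :
    PySem.List.pyGetD (x :: xs) (i + 1) 0 = PySem.List.pyGetD xs i 0 := by
  obtain ⟨n, rfl⟩ := Int.eq_ofNat_of_zero_le hi
  simp [PySem.List.pyGetD, PySem.List.pyGet?_cons_succ]

lemma pvRange_one_shift (m : Int) :
    PySem.List.pyRange 1 (m + 1) 1 = (PySem.List.pyRange 0 m 1).map (· + 1) := by
  rw [PySem.List.pyRange_one, PySem.List.pyRange_one, List.map_map]
  rw [show (m + 1 - 1).toNat = (m - 0).toNat by omega]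
  exact List.map_congr_left (fun k hk => by simp; ring)

lemma pvRange_shift (m : Int) :
    PySem.List.pyRange m 0 (-1) = (PySem.List.pyRange (m - 1) (-1) (-1)).map (· + 1) := by
  rw [PySem.List.pyRange_neg_one, PySem.List.pyRange_neg_one, List.map_map]
  rw [show (m - 1 - (-1)).toNat = (m - 0).toNat by omega]
  exact List.map_congr_left (fun k hk => by simp; ring)

lemma pvRange_split (m : Int) (h : 0 ≤ m) :
    PySem.List.pyRange m (-1) (-1) = PySem.List.pyRange m 0 (-1) ++ [0] := by
  rw [PySem.List.pyRange_neg_one, PySem.List.pyRange_neg_one]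
  rw [show (m - (-1)).toNat = (m - 0).toNat + 1 by omega, List.range_succ, List.map_append]
  simp
  omega

lemma pvCarry (x y : Int) :
    PySem.Int.bor (x >>> (1 : Nat)) ((PySem.Int.band y 1) <<< (7 : Nat)) = pvZ x y := by
  have h := PySem.Int.band_one y
  have h2 : PySem.Int.mod y 2 = 0 ∨ PySem.Int.mod y 2 = 1 := by
    have := PySem.Int.mod_nonneg y (b := 2) (by omega)
    have := PySem.Int.mod_lt y (b := 2) (by omega)
    omega
  unfold pvZ
  rcases h2 with h0 | h1
  · rw [h, h0]; simp [PySem.Int.bor_zero]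
  · rw [h, h1]; simp

lemma pvA_core (b : List Int) (hb : b ≠ []) :
    (PySem.List.pyRange 0 ((b.length : Int) - 1) 1).map
        (fun i => pvFmt02x (pvZ (PySem.List.pyGetD b i 0) (PySem.List.pyGetD b (i + 1) 0)))
      ++ [pvFmt02x (((PySem.List.pyGet? b (-1)).getD 0) >>> (1 : Nat))] = pvG b := by
  induction b with
  | nil => exact absurd rfl hb
  | cons x t ih =>
    cases t with
    | nil =>
      simp [pvG, PySem.List.pyRange_one_eq_nil, PySem.List.pyGet?_neg_one]
    | cons y t' =>
      have hlen : ((x :: y :: t').length : Int) - 1 = (((y :: t').length : Int) - 1) + 1 := by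
        simp
      rw [hlen, PySem.List.pyRange_one_cons (by simp)]
      rw [show (0 : Int) + 1 = 1 from rfl, pvRange_one_shift (((y :: t').length : Int) - 1)]
      rw [List.map_cons, List.map_map]
      have hmap : ∀ i ∈ PySem.List.pyRange 0 (((y :: t').length : Int) - 1) 1,
          ((fun i => pvFmt02x (pvZ (PySem.List.pyGetD (x :: y :: t') i 0)
              (PySem.List.pyGetD (x :: y :: t') (i + 1) 0))) ∘ (· + 1)) i
          = pvFmt02x (pvZ (PySem.List.pyGetD (y :: t') i 0) (PySem.List.pyGetD (y :: t') (i + 1) 0)) := by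
        intro i hi
        have h0 : 0 ≤ i := (PySem.List.mem_pyRange_one.mp hi).1
        simp only [Function.comp]
        rw [pvGetD_cons_succ _ h0, pvGetD_cons_succ _ (by omega)]
      rw [List.map_congr_left hmap]
      have hlast : PySem.List.pyGet? (x :: y :: t') (-1) = PySem.List.pyGet? (y :: t') (-1) := by
        rw [PySem.List.pyGet?_neg_one, PySem.List.pyGet?_neg_one, List.getLast?_cons_cons]
      rw [hlast, List.cons_append, ih (by simp)]
      have hx : PySem.List.pyGetD (x :: y :: t') 0 0 = x := by
        simp [PySem.List.pyGetD]
      have hy : PySem.List.pyGetD (x :: y :: t') (0 + 1) 0 = y := by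
        rw [pvGetD_cons_succ _ (by omega)]
        simp [PySem.List.pyGetD]
      rw [hx, hy]
      rfl

lemma pvB_core (b : List Int) (hb : b ≠ []) :
    (PySem.List.pyRange ((b.length : Int) - 2) (-1) (-1)).foldl (pvF b)
        ([pvFmt02x (((PySem.List.pyGet? b (-1)).getD 0) >>> (1 : Nat))],
         PySem.Int.band ((PySem.List.pyGet? b (-1)).getD 0) 1)
      = ((pvG b).reverse, PySem.Int.band (PySem.List.pyGetD b 0 0) 1) := by
  induction b with
  | nil => exact absurd rfl hb
  | cons x t ih =>
    cases t with
    | nil =>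
      simp [pvG, PySem.List.pyGet?_neg_one, PySem.List.pyGetD]
    | cons y t' =>
      have hlen : ((x :: y :: t').length : Int) - 2 = ((y :: t').length : Int) - 1 := by
        simp; omega
      rw [hlen, pvRange_split _ (by simp), List.foldl_append, pvRange_shift, List.foldl_map]
      have hstep : ∀ (s : List String × Int), ∀ i ∈ PySem.List.pyRange (((y :: t').length : Int) - 1 - 1) (-1) (-1),
          pvF (x :: y :: t') s (i + 1) = pvF (y :: t') s i := by
        intro s i hi
        have h0 : 0 ≤ i := by
          have := (PySem.List.mem_pyRange_neg_one.mp hi).1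
          omega
        unfold pvF
        rw [pvGetD_cons_succ _ h0]
      rw [PySem.List.foldl_congr_mem _ _ _ _ hstep]
      have hlast : PySem.List.pyGet? (x :: y :: t') (-1) = PySem.List.pyGet? (y :: t') (-1) := by
        rw [PySem.List.pyGet?_neg_one, PySem.List.pyGet?_neg_one, List.getLast?_cons_cons]
      rw [hlast, show ((y :: t').length : Int) - 1 - 1 = ((y :: t').length : Int) - 2 by ring,
        ih (by simp)]
      have hx : PySem.List.pyGetD (x :: y :: t') 0 0 = x := by
        simp [PySem.List.pyGetD]
      have hy : PySem.List.pyGetD (y :: t') 0 0 = y := by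
        simp [PySem.List.pyGetD]
      simp only [List.foldl_cons, List.foldl_nil, pvF, hx, hy, pvCarry]
      simp [pvG]

-- ===== VERDICT (by name: the statement is the Claim_ definition above) =====
theorem rs_spec : Claim_equal_rs := by
  intro a _ hpre
  have hb : a.map (fun x => (PySem.Int.ofStrBase? x 16).getD 0) ≠ [] := by
    simpa using hpre.1
  show rs a = rs_alt a
  unfold rs rs_alt
  simp only [PySem.List.foldl_append_singleton_eq_map, List.nil_append]
  set b := a.map (fun x => (PySem.Int.ofStrBase? x 16).getD 0) with hB
  rw [show (a.length : Int) = (b.length : Int) by rw [hB, List.length_map]]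
  show (PySem.List.pyRange 0 ((b.length : Int) - 1) 1).map
        (fun i => pvFmt02x (pvZ (PySem.List.pyGetD b i 0) (PySem.List.pyGetD b (i + 1) 0)))
      ++ [pvFmt02x (((PySem.List.pyGet? b (-1)).getD 0) >>> (1 : Nat))]
    = ((PySem.List.pyRange ((b.length : Int) - 2) (-1) (-1)).foldl (pvF b)
        ([pvFmt02x (((PySem.List.pyGet? b (-1)).getD 0) >>> (1 : Nat))],
         PySem.Int.band ((PySem.List.pyGet? b (-1)).getD 0) 1)).1.reverse
  rw [pvA_core b hb, pvB_core b hb]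
  simp
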